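-- pv_equiv track=rewrite | github.com/grand-roman/algorithms_yandex | sprint_3/sort/K.py | findNumberOfSlices
-- ===== SOURCE A (Python) =====
-- def findNumberOfSlices(array):
--   result = 0
--   start = 0
--   end = 1
--
--   while end < len(array):
--
--     if max(array[start:end]) <= min(array[end:]):
--       start = end
--       end += 1
--       result += 1
--     else:
--       end += 1
--
--   result += 1
--
--   return result
-- ===== SOURCE B (Python) =====
-- def findNumberOfSlices(array):
--     if not array:
--         return 1
--     # suffix minima: suffmin[i] == min(array[i:]), built in one reverse pass
--     suffmin = []
--     m = None
--     for x in reversed(array):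
--         m = x if m is None else min(x, m)
--         suffmin.append(m)
--     suffmin.reverse()
--     # one forward pass with a running prefix maximum: a cut before index i is
--     # valid iff max(array[:i]) <= min(array[i:])
--     result = 1
--     pm = array[0]
--     for x, sm in zip(array[1:], suffmin[1:]):
--         if pm <= sm:
--             result += 1
--         pm = max(pm, x)
--     return result
-- ===== Notes on version B (the rewrite author's own statement) =====
-- stated objective: faster
-- what changed: Replaced the quadratic greedy rescan (max/min of a fresh slice at every loop step) by one reverse pass building suffix minima plus one forward pass with a running prefix maximum, deciding each cut in O(1).
import Mathlib
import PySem

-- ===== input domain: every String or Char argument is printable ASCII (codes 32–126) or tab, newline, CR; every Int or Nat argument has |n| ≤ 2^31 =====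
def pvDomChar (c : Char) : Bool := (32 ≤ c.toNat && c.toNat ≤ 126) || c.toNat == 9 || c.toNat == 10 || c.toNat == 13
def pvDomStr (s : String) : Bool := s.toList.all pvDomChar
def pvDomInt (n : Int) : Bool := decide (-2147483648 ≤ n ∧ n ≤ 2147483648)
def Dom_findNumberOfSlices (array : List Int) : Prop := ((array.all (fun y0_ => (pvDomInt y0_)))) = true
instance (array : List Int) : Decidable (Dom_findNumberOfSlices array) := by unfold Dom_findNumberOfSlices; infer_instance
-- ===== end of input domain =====

-- B replaces A's greedy loop that recomputes max/min of a fresh slice at every step by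
-- one reverse pass building suffix minima plus one forward pass with a running prefix
-- maximum (objective: faster).

-- ===== PORT A =====
-- Python's max()/min() on a list; A only ever applies them to nonempty slices
-- (start < end < len(array)), so the [] branch is unreachable in A's calls.
def pvMaxA : List Int → Int
  | [] => 0
  | a :: t => t.foldl max a

def pvMinA : List Int → Int
  | [] => 0
  | a :: t => t.foldl min a

def loopA (array : List Int) (result : Int) (start e : Nat) : Int :=
  if e < array.length then
    if pvMaxA (PySem.List.slice array (some (start : Int)) (some (e : Int))) ≤
       pvMinA (PySem.List.slice array (some (e : Int)) none) then
      loopA array (result + 1) e (e + 1)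
    else
      loopA array result start (e + 1)
  else
    result + 1
termination_by array.length - e

def findNumberOfSlices (array : List Int) : Int := loopA array 0 0 1

-- ===== PORT B =====
-- "m = x if m is None else min(x, m)"
def omin (om : Option Int) (x : Int) : Int :=
  match om with
  | none => x
  | some m => min x m

-- body of the reversed() loop building suffmin (state: current m, list built so far)
def suffStep (s : Option Int × List Int) (x : Int) : Option Int × List Int :=
  (some (omin s.1 x), s.2 ++ [omin s.1 x])

-- body of the zip loop (state: result, pm)
def mainStep (s : Int × Int) (p : Int × Int) : Int × Int :=
  (if s.2 ≤ p.2 then s.1 + 1 else s.1, max s.2 p.1)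

def findNumberOfSlices_alt (array : List Int) : Int :=
  match array with
  | [] => 1
  | a :: _ =>
    let suffmin := ((array.reverse.foldl suffStep (none, [])).2).reverse
    (((array.drop 1).zip (suffmin.drop 1)).foldl mainStep (1, a)).1

-- ===== PRECONDITION & SPEC =====
def Spec_findNumberOfSlices (array : List Int) (out : Int) : Prop := out = findNumberOfSlices_alt array
instance (array : List Int) (out : Int) : Decidable (Spec_findNumberOfSlices array out) := by unfold Spec_findNumberOfSlices; infer_instance

-- ===== CLAIM (what is proved, stated in full; the proofs are below) =====
def Claim_equal_findNumberOfSlices : Prop := ∀ (array : List Int), Dom_findNumberOfSlices array → Spec_findNumberOfSlices array (findNumberOfSlices array)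

-- ===== LEMMAS AND PROOFS =====

-- minScan l = [min(l[0:]), min(l[1:]), …] : what B's suffmin list is
def minScan : List Int → List Int
  | [] => []
  | a :: t => pvMinA (a :: t) :: minScan t

-- count of valid cuts in the remaining list, threaded with the running prefix maximum pm
def cnt : Int → List Int → Int
  | _, [] => 0
  | pm, x :: t => (if pm ≤ pvMinA (x :: t) then 1 else 0) + cnt (max pm x) t

def pscan : Option Int → List Int → List Int
  | _, [] => []
  | om, x :: t => omin om x :: pscan (some (omin om x)) t

def afterS : Option Int → List Int → Option Int
  | om, [] => om
  | om, x :: t => afterS (some (omin om x)) t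

theorem foldl_min_pull (l : List Int) : ∀ (m b : Int), l.foldl min (min m b) = min m (l.foldl min b) := by
  induction l with
  | nil => intro m b; simp
  | cons c t ih =>
    intro m b
    simp only [List.foldl_cons]
    rw [min_assoc, ih]

theorem foldl_max_pull (l : List Int) : ∀ (m b : Int), l.foldl max (max m b) = max m (l.foldl max b) := by
  induction l with
  | nil => intro m b; simp
  | cons c t ih =>
    intro m b
    simp only [List.foldl_cons]
    rw [max_assoc, ih]

theorem pvMinA_append (l1 l2 : List Int) (h1 : l1 ≠ []) (h2 : l2 ≠ []) :
    pvMinA (l1 ++ l2) = min (pvMinA l1) (pvMinA l2) := by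
  match l1, l2 with
  | a :: t, b :: s =>
    show (t ++ b :: s).foldl min a = _
    rw [List.foldl_append]
    show s.foldl min (min (t.foldl min a) b) = _
    rw [foldl_min_pull]
    rfl

theorem pvMaxA_append (l1 l2 : List Int) (h1 : l1 ≠ []) (h2 : l2 ≠ []) :
    pvMaxA (l1 ++ l2) = max (pvMaxA l1) (pvMaxA l2) := by
  match l1, l2 with
  | a :: t, b :: s =>
    show (t ++ b :: s).foldl max a = _
    rw [List.foldl_append]
    show s.foldl max (max (t.foldl max a) b) = _
    rw [foldl_max_pull]
    rfl

theorem foldl_min_reverse (l : List Int) : ∀ (m : Int), l.reverse.foldl min m = l.foldl min m := by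
  induction l with
  | nil => intro m; rfl
  | cons x t ih =>
    intro m
    rw [List.reverse_cons, List.foldl_append, ih]
    show min (t.foldl min m) x = (t).foldl min (min m x)
    rw [min_comm m x, foldl_min_pull, min_comm]

theorem pvMinA_append_singleton (ys : List Int) (x : Int) : pvMinA (ys ++ [x]) = ys.foldl min x := by
  match ys with
  | [] => rfl
  | b :: t =>
    show (t ++ [x]).foldl min b = (b :: t).foldl min x
    rw [List.foldl_append]
    show min (t.foldl min b) x = t.foldl min (min x b)
    rw [min_comm _ x, ← foldl_min_pull, min_comm x b]

theorem pvMinA_reverse (l : List Int) : pvMinA l.reverse = pvMinA l := by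
  match l with
  | [] => rfl
  | x :: s =>
    rw [List.reverse_cons, pvMinA_append_singleton, foldl_min_reverse]
    rfl

theorem suffFold_snd (l : List Int) : ∀ (om : Option Int) (acc : List Int),
    (l.foldl suffStep (om, acc)).2 = acc ++ pscan om l := by
  induction l with
  | nil => intro om acc; simp [pscan]
  | cons x t ih =>
    intro om acc
    simp only [List.foldl_cons, suffStep, pscan]
    rw [ih]
    simp

theorem pscan_append (xs : List Int) : ∀ (ys : List Int) (om : Option Int),
    pscan om (xs ++ ys) = pscan om xs ++ pscan (afterS om xs) ys := by
  induction xs with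
  | nil => intro ys om; simp [pscan, afterS]
  | cons x t ih =>
    intro ys om
    simp only [List.cons_append, pscan, afterS]
    rw [ih]

theorem afterS_some (l : List Int) : ∀ (m : Int), afterS (some m) l = some (l.foldl min m) := by
  induction l with
  | nil => intro m; rfl
  | cons x t ih =>
    intro m
    simp only [afterS, omin, List.foldl_cons]
    rw [ih, min_comm x m]

theorem afterS_none (l : List Int) (h : l ≠ []) : afterS none l = some (pvMinA l) := by
  match l with
  | x :: s =>
    show afterS (some x) s = _
    rw [afterS_some]
    rfl

theorem pvMinA_cons (a : Int) (t : List Int) (h : t ≠ []) : pvMinA (a :: t) = min a (pvMinA t) := by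
  match t with
  | c :: t' =>
    show (c :: t').foldl min a = _
    simp only [List.foldl_cons]
    rw [foldl_min_pull]
    rfl

theorem pscan_none_reverse (l : List Int) : pscan none l.reverse = (minScan l).reverse := by
  induction l with
  | nil => rfl
  | cons a t ih =>
    rw [List.reverse_cons, pscan_append, ih]
    simp only [minScan, List.reverse_cons, List.append_cancel_left_eq]
    match ht : t with
    | [] => rfl
    | c :: t' =>
      have hne : (c :: t').reverse ≠ [] := by simp
      rw [afterS_none _ hne, pvMinA_reverse]
      show [omin (some (pvMinA (c :: t'))) a] = [pvMinA (a :: c :: t')]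
      rw [pvMinA_cons a (c :: t') (by simp)]
      rfl

theorem foldB (t : List Int) : ∀ (res pm : Int),
    ((t.zip (minScan t)).foldl mainStep (res, pm)).1 = res + cnt pm t := by
  induction t with
  | nil => intro res pm; simp [cnt]
  | cons x t' ih =>
    intro res pm
    show (((x, pvMinA (x :: t')) :: t'.zip (minScan t')).foldl mainStep (res, pm)).1 = _
    simp only [List.foldl_cons, mainStep]
    rw [ih]
    simp only [cnt]
    split_ifs <;> ring

theorem alt_eq_cnt (a : Int) (t : List Int) :
    findNumberOfSlices_alt (a :: t) = 1 + cnt a t := by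
  show ((((a :: t).drop 1).zip (((((a :: t).reverse.foldl suffStep (none, [])).2).reverse).drop 1)).foldl mainStep (1, a)).1 = _
  rw [suffFold_snd, List.nil_append, pscan_none_reverse, List.reverse_reverse]
  show ((t.zip (minScan t)).foldl mainStep (1, a)).1 = _
  rw [foldB]

-- A's chunk condition max(array[start:end]) <= min(array[end:]) is, given the cut
-- invariant at start, equivalent to the prefix condition max(array[:end]) <= min(array[end:])
theorem cond_iff (array : List Int) (start e : Nat) (hse : start < e) (hen : e < array.length)
    (hinv : start = 0 ∨ pvMaxA (array.take start) ≤ pvMinA (array.drop start)) :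
    (pvMaxA ((array.drop start).take (e - start)) ≤ pvMinA (array.drop e)) ↔
    (pvMaxA (array.take e) ≤ pvMinA (array.drop e)) := by
  by_cases h0 : start = 0
  · subst h0; simp
  · have hinv' : pvMaxA (array.take start) ≤ pvMinA (array.drop start) := by
      rcases hinv with h | h
      · exact absurd h h0
      · exact h
    have htake : array.take e = array.take start ++ (array.drop start).take (e - start) := by
      have he : e = start + (e - start) := by omega
      conv_lhs => rw [he, List.take_add]
    have hdrop : array.drop start = (array.drop start).take (e - start) ++ array.drop e := by
      conv_lhs => rw [← List.take_append_drop (e - start) (array.drop start)]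
      rw [List.drop_drop]
      congr 2
      omega
    have hchunk_ne : (array.drop start).take (e - start) ≠ [] := by
      apply List.ne_nil_of_length_pos
      simp
      omega
    have htop_ne : array.take start ≠ [] := by
      apply List.ne_nil_of_length_pos
      simp
      omega
    have hdropE_ne : array.drop e ≠ [] := by
      apply List.ne_nil_of_length_pos
      simp
      omega
    rw [hdrop, pvMinA_append _ _ hchunk_ne hdropE_ne] at hinv'
    rw [htake, pvMaxA_append _ _ htop_ne hchunk_ne]
    constructor
    · intro h
      exact max_le (le_trans hinv' (min_le_right _ _)) h
    · intro h
      exact le_trans (le_max_right _ _) h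

theorem loopA_eq (array : List Int) : ∀ (k : Nat) (result : Int) (start e : Nat),
    array.length - e ≤ k → 0 < e → start < e →
    (start = 0 ∨ pvMaxA (array.take start) ≤ pvMinA (array.drop start)) →
    loopA array result start e = result + cnt (pvMaxA (array.take e)) (array.drop e) + 1 := by
  intro k
  induction k with
  | zero =>
    intro result start e hk h0 hse hinv
    have he : array.length ≤ e := by omega
    rw [loopA, if_neg (by omega), List.drop_eq_nil_of_le he]
    show result + 1 = result + cnt _ [] + 1
    simp [cnt]
  | succ k ih =>
    intro result start e hk h0 hse hinv
    by_cases hlt : e < array.length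
    · have hx : array.drop e = array[e] :: array.drop (e + 1) := List.drop_eq_getElem_cons hlt
      have hsl1 : PySem.List.slice array (some (start : Int)) (some (e : Int)) =
          (array.drop start).take (e - start) := PySem.List.slice_natCast array start e
      have hsl2 : PySem.List.slice array (some (e : Int)) none = array.drop e :=
        PySem.List.slice_from_natCast array e
      have htakee_ne : array.take e ≠ [] := by
        apply List.ne_nil_of_length_pos
        simp
        omega
      have hmax1 : pvMaxA (array.take (e + 1)) = max (pvMaxA (array.take e)) array[e] := by
        rw [List.take_add_one, List.getElem?_eq_getElem hlt]
        show pvMaxA (array.take e ++ [array[e]]) = _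
        rw [pvMaxA_append _ _ htakee_ne (by simp)]
        rfl
      have hcond := cond_iff array start e hse hlt hinv
      rw [loopA, if_pos hlt, hsl1, hsl2]
      by_cases hc : pvMaxA ((array.drop start).take (e - start)) ≤ pvMinA (array.drop e)
      · rw [if_pos hc, ih (result + 1) e (e + 1) (by omega) (by omega) (by omega)
            (Or.inr (hcond.mp hc)), hmax1]
        have hc' := hcond.mp hc
        rw [hx] at hc' ⊢
        simp only [cnt]
        rw [if_pos hc']
        ring
      · rw [if_neg hc, ih result start (e + 1) (by omega) (by omega) (by omega) hinv, hmax1]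
        have hc' : ¬ pvMaxA (array.take e) ≤ pvMinA (array.drop e) := fun h => hc (hcond.mpr h)
        rw [hx] at hc' ⊢
        simp only [cnt]
        rw [if_neg hc']
        ring
    · rw [loopA, if_neg hlt, List.drop_eq_nil_of_le (by omega)]
      show result + 1 = result + cnt _ [] + 1
      simp [cnt]

-- ===== VERDICT (by name: the statement is the Claim_ definition above) =====
theorem findNumberOfSlices_spec : Claim_equal_findNumberOfSlices := by
  intro array _
  unfold Spec_findNumberOfSlices
  match array with
  | [] =>
    show loopA [] 0 0 1 = 1
    rw [loopA]
    norm_num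
  | a :: t =>
    rw [alt_eq_cnt]
    show loopA (a :: t) 0 0 1 = _
    rw [loopA_eq (a :: t) ((a :: t).length - 1) 0 0 1 (le_refl _) (by omega) (by omega) (Or.inl rfl)]
    show 0 + cnt (pvMaxA [a]) t + 1 = _
    show 0 + cnt a t + 1 = _
    ring
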